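-- pv_equiv track=rewrite | github.com/Divam-dev/duikt-cryptography | lb9/freundberg_cipher.py | freundberg_decrypt
-- ===== SOURCE A (Python) =====
-- def freundberg_decrypt(ciphertext, sub_table, gamma):
--     alphabet = 'ABCDEFG'
--     cipher_table = list(sub_table)
--     result = ''
--     for i, char in enumerate(ciphertext):
--         if char in cipher_table:
--             idx = cipher_table.index(char)
--             plain_char = alphabet[idx]
--             result += plain_char
--             shift = gamma[i] % len(alphabet)
--             cipher_table = cipher_table[shift:] + cipher_table[:shift]
--     return result
-- ===== SOURCE B (Python) =====
-- def freundberg_decrypt(ciphertext, sub_table, gamma):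
--     L = len(sub_table)
--     hits = [(i, ch) for i, ch in enumerate(ciphertext) if ch in sub_table]
--     result = []
--     offset = 0
--     for i, ch in hits:
--         result.append(chr(ord('A') + (sub_table.index(ch) - offset) % L))
--         offset = (offset + gamma[i]) % L
--     return ''.join(result)
-- ===== Notes on version B (the rewrite author's own statement) =====
-- stated objective: simpler
-- what changed: B first collects the matched (index, char) positions, then decrypts them in one pass with a cumulative modular offset and chr(ord('A')+idx) arithmetic instead of physically rotating the table per character; …
-- outside the precondition, e.g. on freundberg_decrypt('AA', 'AB', [3, 0]): A returns 'AA', B returns 'AB'; on freundberg_decrypt('AA', 'AAB', [1, 1]): A returns 'AA', B returns 'AC'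
import Mathlib
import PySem

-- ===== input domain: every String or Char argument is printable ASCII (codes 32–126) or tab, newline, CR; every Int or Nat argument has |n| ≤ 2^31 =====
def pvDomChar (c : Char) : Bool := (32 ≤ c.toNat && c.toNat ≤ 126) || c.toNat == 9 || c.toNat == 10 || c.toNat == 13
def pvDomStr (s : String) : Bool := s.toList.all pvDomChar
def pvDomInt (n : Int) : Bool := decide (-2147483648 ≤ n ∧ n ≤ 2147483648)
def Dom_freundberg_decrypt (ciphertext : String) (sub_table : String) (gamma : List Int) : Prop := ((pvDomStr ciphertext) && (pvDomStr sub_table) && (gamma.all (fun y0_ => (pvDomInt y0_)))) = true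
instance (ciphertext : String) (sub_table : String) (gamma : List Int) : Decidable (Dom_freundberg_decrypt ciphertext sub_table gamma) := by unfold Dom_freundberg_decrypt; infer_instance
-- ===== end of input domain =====

-- B first collects the matched (index, char) positions, then decrypts them in one pass with a
-- cumulative modular offset instead of physically rotating the table per character (simpler).

-- ===== PORT A =====
-- one step of A's for-loop; state = some (cipher_table, result), none = a raise happened
def pvA_step (alph : List Char) (gamma : List Int) (s : Option (List Char × List Char))
    (ic : Int × Char) : Option (List Char × List Char) :=
  match s with
  | none => none
  | some (tab, res) =>
    if ic.2 ∈ tab then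
      match PySem.List.index? tab ic.2 with
      | none => none
      | some idx =>
        match PySem.List.pyGet? alph (idx : Int) with
        | none => none
        | some plain =>
          match PySem.List.pyGet? gamma ic.1 with
          | none => none
          | some g =>
            let shift := PySem.Int.mod g 7
            some (PySem.List.slice tab (some shift) none ++ PySem.List.slice tab none (some shift),
                  res ++ [plain])
    else some (tab, res)

def freundberg_decrypt (ciphertext : String) (sub_table : String) (gamma : List Int) : String :=
  let alph : List Char := ['A','B','C','D','E','F','G']
  match (PySem.List.enumerate ciphertext.toList 0).foldl (pvA_step alph gamma)
      (some (sub_table.toList, [])) with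
  | some (_, res) => String.ofList res
  | none => ""          -- unreached inside Pre_: the Python raises there

-- ===== PORT B =====
-- Source B's comprehension: the matched (index, char) positions of the ciphertext
def pvHits (ct : List Char) (tab : List Char) : List (Int × Char) :=
  (PySem.List.enumerate ct 0).filter (fun ic => decide (ic.2 ∈ tab))

-- Source B's for-loop over the hits, carrying the cumulative offset; none = a raise happened.
-- chr(ord('A') + k) with 0 ≤ k (k is a Python % result) is ported by hand as Char.ofNat (65 + k),
-- which is exact there.
def pvB_loop (tab : List Char) (gamma : List Int) (L : Int) :
    List (Int × Char) → Int → List Char → Option (List Char)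
  | [], _, result => some result
  | ic :: rest, offset, result =>
    match PySem.List.index? tab ic.2 with
    | none => none
    | some p =>
      let plain := Char.ofNat (65 + (PySem.Int.mod ((p : Int) - offset) L).toNat)
      match PySem.List.pyGet? gamma ic.1 with
      | none => none
      | some g =>
        pvB_loop tab gamma L rest (PySem.Int.mod (offset + g) L) (result ++ [plain])

def freundberg_decrypt_alt (ciphertext : String) (sub_table : String) (gamma : List Int) : String :=
  let tab := sub_table.toList
  match pvB_loop tab gamma (PySem.List.len tab) (pvHits ciphertext.toList tab) 0 [] with
  | some result => String.ofList result
  | none => ""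

-- ===== PRECONDITION & SPEC =====
-- Pre_ restricts to the cipher's natural domain: when any ciphertext character occurs in the
-- table, sub_table must consist of 7 distinct characters — a table shorter than the 7-letter
-- alphabet makes A's rotate-by-gamma%7 slice a silent no-op, a longer one can raise IndexError
-- on alphabet[idx], and with duplicate characters which occurrence .index finds after a rotation
-- is an accident of the list representation — and every matched position must index into gamma
-- (otherwise A raises IndexError on gamma[i]).
def Pre_freundberg_decrypt (ciphertext : String) (sub_table : String) (gamma : List Int) : Prop :=
  ((ciphertext.toList.any (fun c => decide (c ∈ sub_table.toList))) = true →
      sub_table.toList.Nodup ∧ sub_table.toList.length = 7) ∧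
  (∀ p ∈ ciphertext.toList.zipIdx, p.1 ∈ sub_table.toList → p.2 < gamma.length)

instance (ciphertext : String) (sub_table : String) (gamma : List Int) : Decidable (Pre_freundberg_decrypt ciphertext sub_table gamma) := by unfold Pre_freundberg_decrypt; infer_instance

def pvWitness_freundberg_decrypt : String × String × List Int := ("AB", "BACDEFG", [3, 1])

def Spec_freundberg_decrypt (ciphertext : String) (sub_table : String) (gamma : List Int) (out : String) : Prop := out = freundberg_decrypt_alt ciphertext sub_table gamma
instance (ciphertext : String) (sub_table : String) (gamma : List Int) (out : String) : Decidable (Spec_freundberg_decrypt ciphertext sub_table gamma out) := by unfold Spec_freundberg_decrypt; infer_instance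

-- ===== CLAIM (what is proved, stated in full; the proofs are below) =====
def Claim_equal_freundberg_decrypt : Prop := ∀ (ciphertext : String) (sub_table : String) (gamma : List Int), Dom_freundberg_decrypt ciphertext sub_table gamma → Pre_freundberg_decrypt ciphertext sub_table gamma → Spec_freundberg_decrypt ciphertext sub_table gamma (freundberg_decrypt ciphertext sub_table gamma)

-- ===== LEMMAS AND PROOFS =====

-- list.index? returns the first index of a member
lemma idxOf?_eq_some_idxOf (t : List Char) (c : Char) (h : c ∈ t) :
    List.idxOf? c t = some (t.idxOf c) := by
  induction t with
  | nil => simp at h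
  | cons x xs ih =>
    by_cases hcx : x = c
    · subst hcx; simp [List.idxOf?_cons]
    · have hb : (x == c) = false := by simp [hcx]
      simp only [List.idxOf?_cons, List.idxOf_cons, hb, cond_false]
      rw [ih ((List.mem_cons.mp h).resolve_left (fun he => hcx he.symm))]
      simp

-- A's .index on the rotated table, from the index in the original table
lemma index?_rotate (t : List Char) (hnd : t.Nodup) (c : Char) (hc : c ∈ t) (n : Nat) :
    PySem.List.index? (t.rotate n) c
      = some (((((t.idxOf c : Int)) - (n : Int)) % (t.length : Int)).toNat) := by
  have hL : 0 < t.length := List.length_pos_of_mem hc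
  set p := t.idxOf c with hp
  have hpL : p < t.length := List.idxOf_lt_length_of_mem hc
  set j := ((((p : Int)) - (n : Int)) % (t.length : Int)).toNat with hj
  have hmlt : ((p : Int) - (n : Int)) % (t.length : Int) < (t.length : Int) :=
    Int.emod_lt_of_pos _ (by omega)
  have hmnn : 0 ≤ ((p : Int) - (n : Int)) % (t.length : Int) :=
    Int.emod_nonneg _ (by omega)
  have hjc : (j : Int) = ((p : Int) - (n : Int)) % (t.length : Int) := Int.toNat_of_nonneg hmnn
  have hjL : j < t.length := by omega
  have hmod : (j + n) % t.length = p := by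
    have h1 : (((j + n) % t.length : Nat) : Int) = ((j : Int) + (n : Int)) % (t.length : Int) := by
      push_cast; rfl
    rw [hjc, Int.emod_add_emod, sub_add_cancel, Int.emod_eq_of_lt (by omega) (by omega)] at h1
    exact_mod_cast h1
  have hget : (t.rotate n)[j]'(by simp [List.length_rotate]; omega) = c := by
    rw [List.getElem_rotate, getElem_congr rfl hmod (by omega)]
    exact List.getElem_idxOf hpL
  have hnd' : (t.rotate n).Nodup := List.nodup_rotate.mpr hnd
  have hio : (t.rotate n).idxOf c = j := by
    conv_lhs => rw [← hget]
    exact List.Nodup.idxOf_getElem hnd' j (by simp [List.length_rotate]; omega)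
  rw [PySem.List.index?_eq_idxOf?, idxOf?_eq_some_idxOf _ _ (List.mem_rotate.mpr hc), hio]

-- the 7-letter alphabet is consecutive from 'A'
lemma chr_eq_alph (k : Nat) (hk : k < 7) :
    Char.ofNat (65 + k) = ['A','B','C','D','E','F','G'][k]'(by simp; omega) := by
  interval_cases k <;> rfl

-- main lockstep invariant: A's fold over the remaining enumerated positions, started from the
-- table rotated by B's current offset, returns exactly the result of B's loop over the hits
lemma fold_lockstep (t : List Char) (gamma : List Int) :
    ∀ (e : List (Int × Char)) (off : Int) (res : List Char), 0 ≤ off →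
      (∀ p ∈ e, p.2 ∈ t →
        0 ≤ p.1 ∧ p.1 < (gamma.length : Int) ∧ t.Nodup ∧ t.length = 7) →
      (e.foldl (pvA_step ['A','B','C','D','E','F','G'] gamma)
          (some (t.rotate off.toNat, res))).map (fun q => q.2)
        = pvB_loop t gamma (PySem.List.len t)
            (e.filter (fun ic => decide (ic.2 ∈ t))) off res := by
  intro e
  induction e with
  | nil => intro off res _ _; rfl
  | cons q e ih =>
    intro off res hoff hq
    obtain ⟨i, c⟩ := q
    simp only [List.foldl_cons, List.filter_cons]
    by_cases hm : c ∈ t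
    · obtain ⟨hi0, hig, hnd, hL7⟩ := hq (i, c) (by simp) hm
      have hL : 0 < t.length := by omega
      set p := t.idxOf c with hp
      have hpL : p < t.length := List.idxOf_lt_length_of_mem hm
      have hoffc : ((off.toNat : Int)) = off := Int.toNat_of_nonneg hoff
      set j := (((p : Int) - off) % (t.length : Int)).toNat with hj
      have hjnn : 0 ≤ ((p : Int) - off) % (t.length : Int) := Int.emod_nonneg _ (by omega)
      have hjlt : ((p : Int) - off) % (t.length : Int) < (t.length : Int) :=
        Int.emod_lt_of_pos _ (by omega)
      have hjc : (j : Int) = ((p : Int) - off) % (t.length : Int) := Int.toNat_of_nonneg hjnn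
      have hjL : j < t.length := by omega
      have hidx : PySem.List.index? (t.rotate off.toNat) c = some j := by
        rw [index?_rotate t hnd c hm off.toNat, hoffc]
      have hmemA : c ∈ t.rotate off.toNat := List.mem_rotate.mpr hm
      have halph : PySem.List.pyGet? ['A','B','C','D','E','F','G'] (j : Int)
          = some (['A','B','C','D','E','F','G'][j]'(by simp; omega)) := by
        rw [PySem.List.pyGet?_natCast]
        exact List.getElem?_eq_getElem (by simp; omega)
      have hgam : PySem.List.pyGet? gamma i = some (gamma[i.toNat]'(by omega)) := by
        rw [PySem.List.pyGet?_of_nonneg gamma hi0]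
        exact List.getElem?_eq_getElem (by omega)
      have hidxB : PySem.List.index? t c = some p := by
        rw [PySem.List.index?_eq_idxOf?, idxOf?_eq_some_idxOf _ _ hm]
      have hlen : PySem.List.len t = (t.length : Int) := by simp [PySem.List.len_eq]
      have hmodB : PySem.Int.mod ((p : Int) - off) (PySem.List.len t) = (j : Int) := by
        rw [hlen, PySem.Int.mod_eq_emod_of_pos (by omega), hjc]
      set g := gamma[i.toNat]'(by omega) with hg
      set s := PySem.Int.mod g 7 with hs
      have hs0 : 0 ≤ s := PySem.Int.mod_nonneg g (by omega)
      have hs7 : s < 7 := PySem.Int.mod_lt g (by omega)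
      have hse : s = g % 7 := PySem.Int.mod_eq_emod_of_pos (by omega)
      set off' := PySem.Int.mod (off + g) (PySem.List.len t) with hoff'
      have hoff'e : off' = (off + g) % 7 := by
        rw [hoff', hlen, hL7, PySem.Int.mod_eq_emod_of_pos (by omega)]; norm_num
      have hoff'0 : 0 ≤ off' := by rw [hoff'e]; exact Int.emod_nonneg _ (by omega)
      have hoff'7 : off' < 7 := by rw [hoff'e]; exact Int.emod_lt_of_pos _ (by omega)
      have hrlen : (t.rotate off.toNat).length = t.length := List.length_rotate t off.toNat
      have htab : PySem.List.slice (t.rotate off.toNat) (some s) none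
            ++ PySem.List.slice (t.rotate off.toNat) none (some s)
          = t.rotate off'.toNat := by
        rw [PySem.List.slice_from _ hs0, PySem.List.slice_to _ hs0]
        have h1 : s.toNat ≤ (t.rotate off.toNat).length := by omega
        rw [← List.rotate_eq_drop_append_take h1, List.rotate_rotate]
        have h4 : (off + s) % (7 : Int) = off' := by
          rw [hse, hoff'e, Int.add_emod off (g % 7), Int.emod_emod_of_dvd g (dvd_refl 7),
            ← Int.add_emod]
        have h2 : off'.toNat = (off.toNat + s.toNat) % t.length := by
          have hcast : (((off.toNat + s.toNat) % 7 : Nat) : Int) = off' := by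
            push_cast [hoffc, Int.toNat_of_nonneg hs0]
            exact h4
          rw [hL7]
          omega
        rw [h2, List.rotate_mod]
      have hA : pvA_step ['A','B','C','D','E','F','G'] gamma (some (t.rotate off.toNat, res)) (i, c)
          = some (t.rotate off'.toNat, res ++ [['A','B','C','D','E','F','G'][j]'(by simp; omega)]) := by
        simp only [pvA_step, if_pos hmemA, hidx, halph]
        rw [show PySem.List.pyGet? gamma (i, c).1 = some g from hgam]
        simp only [← hs, htab]
      rw [hA, if_pos (by simpa using hm)]
      have hchr : Char.ofNat (65 + ((PySem.Int.mod ((p : Int) - off) (PySem.List.len t)).toNat))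
          = ['A','B','C','D','E','F','G'][j]'(by simp; omega) := by
        rw [hmodB]
        simp only [Int.toNat_natCast]
        exact chr_eq_alph j (by omega)
      have hB : pvB_loop t gamma (PySem.List.len t)
            ((i, c) :: e.filter (fun ic => decide (ic.2 ∈ t))) off res
          = pvB_loop t gamma (PySem.List.len t)
              (e.filter (fun ic => decide (ic.2 ∈ t))) off'
              (res ++ [['A','B','C','D','E','F','G'][j]'(by simp; omega)]) := by
        simp only [pvB_loop, hidxB, hchr,
          show PySem.List.pyGet? gamma (i, c).1 = some g from hgam]
        rfl
      rw [hB]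
      exact ih _ _ hoff'0 (fun p hp hpt => hq p (by simp [hp]) hpt)
    · have hmemA : c ∉ t.rotate off.toNat := fun h => hm (List.mem_rotate.mp h)
      have hA : pvA_step ['A','B','C','D','E','F','G'] gamma (some (t.rotate off.toNat, res)) (i, c)
          = some (t.rotate off.toNat, res) := by
        simp only [pvA_step, if_neg hmemA]
      rw [hA, if_neg (by simpa using hm)]
      exact ih _ _ hoff (fun p hp hpt => hq p (by simp [hp]) hpt)

-- ===== VERDICT (by name: the statement is the Claim_ definition above) =====
theorem freundberg_decrypt_spec : Claim_equal_freundberg_decrypt := by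
  intro ct st gamma _ hpre
  obtain ⟨h1, h2⟩ := hpre
  unfold Spec_freundberg_decrypt freundberg_decrypt freundberg_decrypt_alt
  have key := fold_lockstep st.toList gamma (PySem.List.enumerate ct.toList 0) 0 [] le_rfl ?_
  · rw [show ((0 : Int).toNat) = 0 from rfl, List.rotate_zero] at key
    simp only [pvHits]
    rw [← key]
    cases (PySem.List.enumerate ct.toList 0).foldl
        (pvA_step ['A','B','C','D','E','F','G'] gamma) (some (st.toList, [])) with
    | none => rfl
    | some q => rfl
  · intro p hp hpt
    rw [PySem.List.mem_enumerate_iff] at hp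
    obtain ⟨k, hk, rfl⟩ := hp
    refine ⟨by omega, ?_, h1 (List.any_eq_true.mpr ⟨ct.toList[k], List.getElem_mem hk, by simpa using hpt⟩)⟩
    have := h2 (ct.toList[k], k) (List.mem_zipIdx_iff_getElem?.mpr (by simp)) hpt
    omega
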